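-- pv_equiv track=rewrite | github.com/coolcrazyben/MagicML | backend/combo_detector.py | _combo_fits_identity
-- ===== SOURCE A (Python) =====
-- def _combo_fits_identity(
--     required_cards: list[str],
--     color_map: dict[str, set[str]],
--     commander_colors: set[str],
-- ) -> bool:
--     """
--     Return True if every card in the combo has a color identity that is a
--     subset of the commander's color identity.
--
--     Cards not found in the database are given the benefit of the doubt
--     (treated as colorless) so we don't accidentally discard valid combos
--     due to missing data.
--     """
--     for card in required_cards:
--         card_colors = color_map.get(card.strip().lower(), set())
--         if not card_colors.issubset(commander_colors):
--             return False
--     return True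
-- ===== SOURCE B (Python) =====
-- def _combo_fits_identity(
--     required_cards: list[str],
--     color_map: dict[str, set[str]],
--     commander_colors: set[str],
-- ) -> bool:
--     union = set()
--     for card in required_cards:
--         union |= color_map.get(card.strip().lower(), set())
--     return union.issubset(commander_colors)
-- ===== Notes on version B (the rewrite author's own statement) =====
-- stated objective: alternative
-- what changed: Replaces the per-card subset test with early return by accumulating the union of all cards' color identities in one loop and performing a single final subset check against the commander's colors.
import Mathlib
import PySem

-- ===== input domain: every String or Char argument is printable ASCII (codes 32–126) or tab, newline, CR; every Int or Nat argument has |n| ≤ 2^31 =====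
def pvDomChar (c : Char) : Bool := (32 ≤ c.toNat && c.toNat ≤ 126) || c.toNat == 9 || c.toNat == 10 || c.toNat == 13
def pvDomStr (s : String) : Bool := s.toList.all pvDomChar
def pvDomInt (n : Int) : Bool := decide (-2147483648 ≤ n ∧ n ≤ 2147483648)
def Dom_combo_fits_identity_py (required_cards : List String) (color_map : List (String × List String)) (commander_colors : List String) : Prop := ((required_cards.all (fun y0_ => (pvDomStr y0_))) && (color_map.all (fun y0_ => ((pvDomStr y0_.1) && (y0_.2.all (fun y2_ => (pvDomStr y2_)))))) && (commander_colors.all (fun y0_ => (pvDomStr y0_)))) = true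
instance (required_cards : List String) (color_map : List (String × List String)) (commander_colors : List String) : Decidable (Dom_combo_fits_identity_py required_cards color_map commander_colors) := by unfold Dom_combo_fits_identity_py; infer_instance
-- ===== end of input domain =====

-- B replaces A's per-card subset test with early return by one loop accumulating the union of all cards' color identities, then a single final subset check (alternative decomposition, same cost).
-- ===== PORT A =====
def combo_fits_identity_py_go (color_map : List (String × List String)) (commander_colors : List String) : List String → Bool
  | [] => true
  | card :: rest =>
    let card_colors := (List.lookup (PySem.Str.lower (PySem.Str.strip card)) color_map).getD []
    if !(PySem.Set.issubset card_colors commander_colors) then false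
    else combo_fits_identity_py_go color_map commander_colors rest

def combo_fits_identity_py (required_cards : List String) (color_map : List (String × List String)) (commander_colors : List String) : Bool :=
  combo_fits_identity_py_go color_map commander_colors required_cards

-- ===== PORT B =====
def combo_fits_identity_py_alt (required_cards : List String) (color_map : List (String × List String)) (commander_colors : List String) : Bool :=
  let union := required_cards.foldl
    (fun u card => PySem.Set.update u ((List.lookup (PySem.Str.lower (PySem.Str.strip card)) color_map).getD []))
    PySem.Set.empty
  PySem.Set.issubset union commander_colors

-- ===== PRECONDITION & SPEC =====
def Spec_combo_fits_identity_py (required_cards : List String) (color_map : List (String × List String)) (commander_colors : List String) (out : Bool) : Prop := out = combo_fits_identity_py_alt required_cards color_map commander_colors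
instance (required_cards : List String) (color_map : List (String × List String)) (commander_colors : List String) (out : Bool) : Decidable (Spec_combo_fits_identity_py required_cards color_map commander_colors out) := by unfold Spec_combo_fits_identity_py; infer_instance

-- ===== CLAIM (what is proved, stated in full; the proofs are below) =====
def Claim_equal_combo_fits_identity_py : Prop := ∀ (required_cards : List String) (color_map : List (String × List String)) (commander_colors : List String), Dom_combo_fits_identity_py required_cards color_map commander_colors → Spec_combo_fits_identity_py required_cards color_map commander_colors (combo_fits_identity_py required_cards color_map commander_colors)

-- ===== LEMMAS AND PROOFS =====

-- all-elements-in-t distributes over Set.update: the skipped duplicates are already in u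
lemma pv_issubset_update (u : PySem.Set String) (xs t : List String) :
    PySem.Set.issubset (PySem.Set.update u xs) t
      = (PySem.Set.issubset u t && PySem.Set.issubset xs t) := by
  rw [Bool.eq_iff_iff]
  simp [PySem.Set.issubset_iff, PySem.Set.mem_update, or_imp, forall_and]

-- loop invariant: B's final subset check over the running union equals the check
-- on the accumulator so far times A's remaining early-exit loop
lemma pv_loop_eq (cm : List (String × List String)) (cc : List String) :
    ∀ (rc : List String) (u : PySem.Set String),
      PySem.Set.issubset
        (rc.foldl (fun u card =>
          PySem.Set.update u ((List.lookup (PySem.Str.lower (PySem.Str.strip card)) cm).getD [])) u) cc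
      = (PySem.Set.issubset u cc && combo_fits_identity_py_go cm cc rc) := by
  intro rc
  induction rc with
  | nil => intro u; simp [combo_fits_identity_py_go]
  | cons card rest ih =>
    intro u
    simp only [List.foldl_cons, ih, pv_issubset_update, combo_fits_identity_py_go]
    cases h : PySem.Set.issubset ((List.lookup (PySem.Str.lower (PySem.Str.strip card)) cm).getD []) cc <;> simp [h]

-- ===== VERDICT (by name: the statement is the Claim_ definition above) =====
theorem combo_fits_identity_py_spec : Claim_equal_combo_fits_identity_py := by
  intro rc cm cc _
  unfold Spec_combo_fits_identity_py combo_fits_identity_py combo_fits_identity_py_alt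
  rw [pv_loop_eq cm cc rc PySem.Set.empty]
  rfl
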